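-- pv_equiv track=rewrite | github.com/bwindsor/advent-of-code-2025 | day2/day2.py | has_repeats
-- ===== SOURCE A (Python) =====
-- import math
--
-- def _get_candidate(num_repeats: int, repeated_part_start: int, d: int):
--     candidate = 0
--     for p in range(0, num_repeats):
--         candidate += repeated_part_start * d ** p
--     return candidate
--
-- def is_prime(x: int) -> bool:
--     for i in range(2, int(math.sqrt(x)) + 1):
--         if x % i == 0:
--             return False
--     return True
--
-- def has_repeats(x: int, x_len: int) -> bool:
--     for i_num_repeats in range(2, x_len + 1):
--         if x_len % i_num_repeats == 0 and is_prime(i_num_repeats):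
--             d = 10 ** (x_len // i_num_repeats)
--             repeated_part = x // (d ** (i_num_repeats - 1))
--             candidate = _get_candidate(i_num_repeats, repeated_part, d)
--             if x == candidate:
--                 return True
--     return False
-- ===== SOURCE B (Python) =====
-- def _is_block_repeat(x: int, x_len: int, p: int) -> bool:
--     # True iff x equals its leading block of x_len // p digits repeated p times.
--     d = 10 ** (x_len // p)
--     # x == block * (1 + d + ... + d**(p-1)) cross-multiplied by (d - 1): no big division
--     return x * (d - 1) == (x // d ** (p - 1)) * (d ** p - 1)
--
-- def has_repeats(x: int, x_len: int) -> bool: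
--     # Trial-divide x_len once; test only its distinct prime factors.
--     n = x_len
--     p = 2
--     while p * p <= n:
--         if n % p == 0:
--             if _is_block_repeat(x, x_len, p):
--                 return True
--             while n % p == 0:
--                 n //= p
--         p += 1
--     return n > 1 and _is_block_repeat(x, x_len, n)
-- ===== Notes on version B (the rewrite author's own statement) =====
-- stated objective: faster
-- what changed: B trial-factorizes x_len once and tests only its distinct prime factors (instead of primality-testing every candidate in range(2, x_len+1)), and replaces the O(p) big-int candidate-accumulation loop by the geometric-series closed form (d**p - 1) // (d - 1).
import Mathlib
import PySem

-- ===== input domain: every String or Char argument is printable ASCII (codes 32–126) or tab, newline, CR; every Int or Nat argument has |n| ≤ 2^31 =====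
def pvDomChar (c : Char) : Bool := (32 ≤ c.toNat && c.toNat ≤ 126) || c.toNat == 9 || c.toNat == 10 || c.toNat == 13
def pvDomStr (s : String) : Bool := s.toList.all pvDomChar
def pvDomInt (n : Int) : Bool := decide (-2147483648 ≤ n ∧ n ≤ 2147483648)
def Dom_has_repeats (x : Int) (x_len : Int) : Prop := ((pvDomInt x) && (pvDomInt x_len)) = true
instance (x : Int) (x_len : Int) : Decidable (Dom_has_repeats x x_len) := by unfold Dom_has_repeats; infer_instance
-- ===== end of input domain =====

-- B factorizes x_len by trial division (testing only its distinct prime factors) and uses the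
-- geometric-series closed form for the repeated candidate, instead of A's scan of every
-- divisor candidate in range(2, x_len+1) with a per-candidate primality test and summation loop.


-- ===== PORT A =====
def pv_get_candidate (num_repeats : Int) (repeated_part_start : Int) (d : Int) : Int :=
  (PySem.List.pyRange 0 num_repeats 1).foldl
    (fun candidate p => candidate + repeated_part_start * d ^ p.toNat) 0

-- int(math.sqrt(x)) is ported as Nat.sqrt x.toNat: exact for 0 ≤ x ≤ 2^32, since IEEE double
-- sqrt is correctly rounded and its floor equals the integer square root on that range
-- (has_repeats only calls is_prime with 2 ≤ x ≤ x_len).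
def pv_is_prime (x : Int) : Bool :=
  !(PySem.List.pyRange 2 ((Nat.sqrt x.toNat : Int) + 1) 1).any
    (fun i => PySem.Int.mod x i == 0)

def has_repeats (x : Int) (x_len : Int) : Bool :=
  -- for-loop with early `return True` = List.any over the range
  (PySem.List.pyRange 2 (x_len + 1) 1).any (fun i =>
    if PySem.Int.mod x_len i == 0 && pv_is_prime i then
      let d : Int := 10 ^ (PySem.Int.floordiv x_len i).toNat
      let repeated_part := PySem.Int.floordiv x (d ^ (i - 1).toNat)
      x == pv_get_candidate i repeated_part d
    else false)

-- ===== PORT B =====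
def pv_is_block_repeat (x : Int) (x_len : Int) (p : Int) : Bool :=
  let d : Int := 10 ^ (PySem.Int.floordiv x_len p).toNat
  -- x == block * (1 + d + ... + d^(p-1)) cross-multiplied by (d - 1)
  x * (d - 1) == PySem.Int.floordiv x (d ^ (p - 1).toNat) * (d ^ p.toNat - 1)

-- inner `while n % p == 0: n //= p`; fuel n.toNat suffices since n strictly decreases
def pv_strip (fuel : Nat) (n p : Int) : Int :=
  match fuel with
  | 0 => n
  | fuel + 1 =>
    if PySem.Int.mod n p == 0 then pv_strip fuel (PySem.Int.floordiv n p) p else n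

-- outer `while p * p <= n`; fuel x_len.toNat + 2 suffices since p increases up to ≤ n + 1
def pv_loop (fuel : Nat) (x x_len n p : Int) : Bool :=
  match fuel with
  | 0 => false
  | fuel + 1 =>
    if p * p ≤ n then
      if PySem.Int.mod n p == 0 then
        if pv_is_block_repeat x x_len p then true
        else pv_loop fuel x x_len (pv_strip n.toNat n p) (p + 1)
      else pv_loop fuel x x_len n (p + 1)
    else decide (n > 1) && pv_is_block_repeat x x_len n

def has_repeats_alt (x : Int) (x_len : Int) : Bool :=
  pv_loop (x_len.toNat + 2) x x_len x_len 2

-- ===== PRECONDITION & SPEC =====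
def Spec_has_repeats (x : Int) (x_len : Int) (out : Bool) : Prop := out = has_repeats_alt x x_len
instance (x : Int) (x_len : Int) (out : Bool) : Decidable (Spec_has_repeats x x_len out) := by unfold Spec_has_repeats; infer_instance

-- ===== CLAIM (what is proved, stated in full; the proofs are below) =====
def Claim_equal_has_repeats : Prop := ∀ (x : Int) (x_len : Int), Dom_has_repeats x x_len → Spec_has_repeats x x_len (has_repeats x x_len)

-- ===== LEMMAS AND PROOFS =====

-- the canonical meaning both programs compute: some prime divisor p of x_len passes the block test
def PrimeI (q : Int) : Prop := 2 ≤ q ∧ Nat.Prime q.toNat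

def Hits (x L q : Int) : Prop := PrimeI q ∧ q ∣ L ∧ q ≤ L ∧ pv_is_block_repeat x L q = true

-- A's primality test agrees with Nat.Prime on 2 ≤ i
lemma pv_is_prime_iff (i : Int) (hi : 2 ≤ i) : pv_is_prime i = true ↔ Nat.Prime i.toNat := by
  rw [Nat.prime_def_le_sqrt]
  unfold pv_is_prime
  rw [Bool.not_eq_eq_eq_not, Bool.not_true, ← Bool.not_eq_true, List.any_eq_true]
  constructor
  · intro h
    refine ⟨by omega, fun m hm2 hms hdvd => h ?_⟩
    refine ⟨(m : Int), ?_, ?_⟩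
    · rw [PySem.List.mem_pyRange_one]; omega
    · rw [beq_iff_eq, PySem.Int.mod_eq_zero_iff_dvd]
      have h := Int.natCast_dvd_natCast.mpr hdvd
      rwa [Int.toNat_of_nonneg (show (0:Int) ≤ i by omega)] at h
  · rintro ⟨_, h⟩ ⟨j, hjmem, hjdvd⟩
    rw [PySem.List.mem_pyRange_one] at hjmem
    rw [beq_iff_eq, PySem.Int.mod_eq_zero_iff_dvd] at hjdvd
    refine h j.toNat (by omega) (by omega) (Int.natCast_dvd_natCast.mp ?_)
    rwa [Int.toNat_of_nonneg (show (0:Int) ≤ j by omega),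
      Int.toNat_of_nonneg (show (0:Int) ≤ i by omega)]

lemma foldl_geom (r d : Int) (m : Nat) (c0 : Int) :
    (List.range m).foldl (fun c k => c + r * d ^ k) c0 = c0 + r * ∑ k ∈ Finset.range m, d ^ k := by
  induction m generalizing c0 with
  | zero => simp
  | succ m ih =>
      rw [List.range_succ, List.foldl_append, ih, Finset.sum_range_succ]
      simp; ring

-- A's summation loop equals repeated_part * (geometric sum)
lemma get_candidate_eq (p r d : Int) :
    pv_get_candidate p r d = r * ∑ k ∈ Finset.range p.toNat, d ^ k := by
  unfold pv_get_candidate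
  rw [PySem.List.pyRange_one, List.foldl_map]
  simp only [zero_add, Int.toNat_natCast, Int.sub_zero]
  rw [foldl_geom]; ring

-- A's per-candidate body (for a divisor 2 ≤ i of L) is exactly B's block test
lemma body_eq_block (x L i : Int) (hi : 2 ≤ i) (hdvd : i ∣ L) (hL : 2 ≤ L) :
    (x == pv_get_candidate i (PySem.Int.floordiv x ((10 ^ (PySem.Int.floordiv L i).toNat : Int) ^ (i - 1).toNat)) (10 ^ (PySem.Int.floordiv L i).toNat))
      = pv_is_block_repeat x L i := by
  have hiL : i ≤ L := Int.le_of_dvd (by omega) hdvd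
  have he : 1 ≤ PySem.Int.floordiv L i := by
    rw [PySem.Int.le_floordiv_iff_mul_le (by omega)]; omega
  have hd : 2 ≤ (10 : Int) ^ (PySem.Int.floordiv L i).toNat := by
    calc (2:Int) ≤ 10 ^ 1 := by norm_num
    _ ≤ 10 ^ (PySem.Int.floordiv L i).toNat :=
        pow_le_pow_right₀ (by norm_num) (by omega)
  simp only [pv_is_block_repeat]
  rw [get_candidate_eq]
  set d : Int := 10 ^ (PySem.Int.floordiv L i).toNat with hdd
  set r : Int := PySem.Int.floordiv x (d ^ (i - 1).toNat) with hrr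
  have hgs : (∑ k ∈ Finset.range i.toNat, d ^ k) * (d - 1) = d ^ i.toNat - 1 :=
    geom_sum_mul d i.toNat
  rw [Bool.eq_iff_iff]
  simp only [beq_iff_eq]
  constructor
  · intro h
    rw [h, ← hgs]; ring
  · intro h
    rw [← hgs] at h
    exact mul_right_cancel₀ (show d - 1 ≠ 0 by omega) (by linear_combination h)

-- p has no divisors in [2, p) → prime
lemma primeI_of_no_divisors (p : Int) (hp : 2 ≤ p)
    (h : ∀ m : Int, 2 ≤ m → m < p → ¬ m ∣ p) : PrimeI p := by
  refine ⟨hp, (Nat.prime_def_lt).mpr ⟨by omega, fun m hm hdvd => ?_⟩⟩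
  by_contra hne
  have hm0 : m ≠ 0 := by
    rintro rfl
    have := Nat.zero_dvd.mp hdvd; omega
  refine h (m : Int) (by omega) (by omega) ?_
  have hd := Int.natCast_dvd_natCast.mpr hdvd
  rwa [Int.toNat_of_nonneg (show (0:Int) ≤ p by omega)] at hd

-- A = true iff some prime divisor hits
lemma hasA_iff (x L : Int) : has_repeats x L = true ↔ ∃ q, Hits x L q := by
  unfold has_repeats
  rw [List.any_eq_true]
  constructor
  · rintro ⟨i, hmem, hf⟩
    rw [PySem.List.mem_pyRange_one] at hmem
    by_cases hc : (PySem.Int.mod L i == 0 && pv_is_prime i) = true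
    · rw [if_pos hc] at hf
      rw [Bool.and_eq_true, beq_iff_eq, PySem.Int.mod_eq_zero_iff_dvd] at hc
      have hL : 2 ≤ L := by omega
      refine ⟨i, ⟨⟨by omega, (pv_is_prime_iff i (by omega)).mp hc.2⟩, hc.1, by omega, ?_⟩⟩
      rw [← body_eq_block x L i (by omega) hc.1 hL]
      exact hf
    · rw [if_neg hc] at hf; exact absurd hf (by simp)
  · rintro ⟨q, ⟨⟨hq2, hqp⟩, hqdvd, hqL, hblk⟩⟩
    have hL : 2 ≤ L := by omega
    have hc : (PySem.Int.mod L q == 0 && pv_is_prime q) = true := by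
      rw [Bool.and_eq_true, beq_iff_eq, PySem.Int.mod_eq_zero_iff_dvd]
      exact ⟨hqdvd, (pv_is_prime_iff q hq2).mpr hqp⟩
    refine ⟨q, by rw [PySem.List.mem_pyRange_one]; omega, ?_⟩
    rw [if_pos hc, body_eq_block x L q hq2 hqdvd hL]
    exact hblk

-- strip removes exactly the factor p
lemma strip_spec (fuel : Nat) (n p : Int) (hp : 2 ≤ p) (hn : 1 ≤ n) (hf : n.toNat ≤ fuel) :
    ∃ k : Nat, n = p ^ k * pv_strip fuel n p ∧ ¬ p ∣ pv_strip fuel n p ∧ 1 ≤ pv_strip fuel n p := by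
  induction fuel generalizing n with
  | zero => omega
  | succ fuel ih =>
      rw [pv_strip]
      by_cases hdvd : p ∣ n
      · rw [if_pos (by rw [beq_iff_eq, PySem.Int.mod_eq_zero_iff_dvd]; exact hdvd)]
        have hple : p ≤ n := Int.le_of_dvd (by omega) hdvd
        have heq : PySem.Int.floordiv n p = n / p := PySem.Int.floordiv_eq_ediv_of_pos (by omega)
        have hmul : p * (n / p) = n := Int.mul_ediv_cancel' hdvd
        have h1 : 1 ≤ n / p := by rw [Int.le_ediv_iff_mul_le (by omega)]; omega
        have hlt : n / p < n := by nlinarith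
        rw [heq]
        obtain ⟨k, hk, hnd, hge⟩ := ih (n / p) h1 (by omega)
        refine ⟨k + 1, ?_, hnd, hge⟩
        linear_combination p * hk - hmul
      · rw [if_neg (by rw [beq_iff_eq, PySem.Int.mod_eq_zero_iff_dvd]; exact hdvd)]
        exact ⟨0, by ring, hdvd, hn⟩

-- loop invariant characterisation
lemma loop_iff (fuel : Nat) (x L n p : Int) (hp : 2 ≤ p) (hn : 1 ≤ n)
    (hsmall : ∀ q : Int, 2 ≤ q → q < p → ¬ q ∣ n) (hf : (n - p).toNat + 2 ≤ fuel) :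
    (pv_loop fuel x L n p = true ↔ ∃ q, PrimeI q ∧ q ∣ n ∧ pv_is_block_repeat x L q = true) := by
  induction fuel generalizing n p with
  | zero => omega
  | succ fuel ih =>
      rw [pv_loop]
      have h2p : 2 * p ≤ p * p := by nlinarith
      by_cases hg : p * p ≤ n
      · rw [if_pos hg]
        by_cases hdvd : p ∣ n
        · rw [if_pos (by rw [beq_iff_eq, PySem.Int.mod_eq_zero_iff_dvd]; exact hdvd)]
          have hpprime : PrimeI p := primeI_of_no_divisors p hp
            (fun m hm2 hmp hmdvd => hsmall m hm2 hmp (hmdvd.trans hdvd))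
          by_cases hchk : pv_is_block_repeat x L p = true
          · rw [if_pos hchk]
            exact ⟨fun _ => ⟨p, hpprime, hdvd, hchk⟩, fun _ => rfl⟩
          · rw [if_neg hchk]
            obtain ⟨k, hfact, hnd, hn1⟩ := strip_spec n.toNat n p hp hn le_rfl
            set n' := pv_strip n.toNat n p with hn'
            have hdn : n' ∣ n := Dvd.intro_left _ hfact.symm
            have hle : n' ≤ n := Int.le_of_dvd (by omega) hdn
            have hsmall' : ∀ q : Int, 2 ≤ q → q < p + 1 → ¬ q ∣ n' := by
              intro q hq2 hqp hqdvd
              rcases lt_or_ge q p with h | h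
              · exact hsmall q hq2 h (hqdvd.trans hdn)
              · have : q = p := by omega
                exact hnd (this ▸ hqdvd)
            rw [ih n' (p + 1) (by omega) (by omega) hsmall' (by omega)]
            constructor
            · rintro ⟨q, hqp, hqdvd, hqc⟩
              exact ⟨q, hqp, hqdvd.trans hdn, hqc⟩
            · rintro ⟨q, hqp, hqdvd, hqc⟩
              refine ⟨q, hqp, ?_, hqc⟩
              have hq2 := hqp.1
              have hqne : q ≠ p := by
                rintro rfl; exact hchk hqc
              have hqInt : Prime q := by
                rw [Int.prime_iff_natAbs_prime]
                have : q.natAbs = q.toNat := by omega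
                rw [this]; exact hqp.2
              have hd : q ∣ p ^ k * n' := hfact ▸ hqdvd
              rcases (hqInt.dvd_mul).mp hd with h | h
              · exfalso
                have hqp' : q ∣ p := hqInt.dvd_of_dvd_pow h
                have hnat : q.toNat ∣ p.toNat := by
                  apply Int.natCast_dvd_natCast.mp
                  rwa [Int.toNat_of_nonneg (show (0:Int) ≤ q by omega),
                    Int.toNat_of_nonneg (show (0:Int) ≤ p by omega)]
                rcases (hpprime.2.eq_one_or_self_of_dvd _ hnat) with h' | h'
                · omega
                · exact hqne (by omega)
              · exact h
        · rw [if_neg (by rw [beq_iff_eq, PySem.Int.mod_eq_zero_iff_dvd]; exact hdvd)]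
          have hsmall' : ∀ q : Int, 2 ≤ q → q < p + 1 → ¬ q ∣ n := by
            intro q hq2 hqp hqdvd
            rcases lt_or_ge q p with h | h
            · exact hsmall q hq2 h hqdvd
            · have : q = p := by omega
              exact hdvd (this ▸ hqdvd)
          exact ih n (p + 1) (by omega) hn hsmall' (by omega)
      · rw [if_neg hg]
        rcases eq_or_lt_of_le hn with h1 | h1
        · -- n = 1 : no prime divides it, and the loop returns false
          constructor
          · intro h
            rw [Bool.and_eq_true, decide_eq_true_iff] at h; omega
          · rintro ⟨q, hqp, hqdvd, _⟩
            have := Int.le_of_dvd (by omega : (0:Int) < n) hqdvd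
            have := hqp.1; omega
        · -- n ≥ 2 and has no divisor in [2, n): n is prime
          have hn2 : 2 ≤ n := by omega
          have hnp : PrimeI n := by
            refine primeI_of_no_divisors n hn2 (fun m hm2 hmn hmdvd => ?_)
            rcases lt_or_ge m p with h | h
            · exact hsmall m hm2 h hmdvd
            · obtain ⟨c, hc⟩ := hmdvd
              have hc0 : 0 < c := by nlinarith
              have hc2 : 2 ≤ c := by nlinarith
              have hcp : c < p := by nlinarith
              exact hsmall c hc2 hcp ⟨m, by rw [hc]; ring⟩
          have hgt : decide (n > 1) = true := by simp; omega
          rw [hgt, Bool.true_and]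
          constructor
          · intro h; exact ⟨n, hnp, dvd_refl n, h⟩
          · rintro ⟨q, hqp, hqdvd, hqc⟩
            have hq2 := hqp.1
            have hq0 : 0 < q := by omega
            have hnat : q.toNat ∣ n.toNat := by
              apply Int.natCast_dvd_natCast.mp
              rwa [Int.toNat_of_nonneg (show (0:Int) ≤ q by omega),
                Int.toNat_of_nonneg (show (0:Int) ≤ n by omega)]
            rcases hnp.2.eq_one_or_self_of_dvd _ hnat with h' | h'
            · omega
            · have heq : q = n := by omega
              exact heq ▸ hqc

-- B = true iff some prime divisor hits
lemma hasB_iff (x L : Int) : has_repeats_alt x L = true ↔ ∃ q, Hits x L q := by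
  unfold has_repeats_alt
  rcases le_or_gt L 1 with hL | hL
  · rw [pv_loop]
    rw [if_neg (by omega)]
    constructor
    · intro h
      rw [Bool.and_eq_true, decide_eq_true_iff] at h; omega
    · rintro ⟨q, ⟨⟨hq2, _⟩, _, hqL, _⟩⟩; omega
  · rw [loop_iff (L.toNat + 2) x L L 2 (by omega) (by omega) (by omega) (by omega)]
    constructor
    · rintro ⟨q, hqp, hqdvd, hqc⟩
      exact ⟨q, hqp, hqdvd, Int.le_of_dvd (by omega) hqdvd, hqc⟩
    · rintro ⟨q, hqp, hqdvd, _, hqc⟩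
      exact ⟨q, hqp, hqdvd, hqc⟩

-- ===== VERDICT (by name: the statement is the Claim_ definition above) =====
theorem has_repeats_spec : Claim_equal_has_repeats := by
  intro x L _
  unfold Spec_has_repeats
  have h := (hasA_iff x L).trans (hasB_iff x L).symm
  rcases Bool.eq_false_or_eq_true (has_repeats_alt x L) with hb | hb <;>
    rcases Bool.eq_false_or_eq_true (has_repeats x L) with ha | ha <;>
    simp_all
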